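-- pv_equiv track=rewrite | github.com/SXV357/Complete-Python-Developer-in-2022-ZTM | Problems/CodingBat/Logic-2.py | scores_increasing
-- ===== SOURCE A (Python) =====
-- def scores_increasing(arr):
--     counter = 0
--     for i in range(len(arr) - 1):
--         if arr[i + 1] >= arr[i]:
--             counter += 1
--     if counter == len(arr) - 1:
--         return True
--     return False
-- ===== SOURCE B (Python) =====
-- def scores_increasing(arr):
--     return arr == sorted(arr)
-- ===== Notes on version B (the rewrite author's own statement) =====
-- stated objective: simpler
-- what changed: Replaces the manual pairwise-comparison counter loop and the counter==len-1 check with a single sort-then-compare: arr == sorted(arr).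
-- intended difference: On the empty list A returns False (its counter==len(arr)-1 test compares 0 with -1), while B returns True; an empty sequence is vacuously non-decreasing, so B's value is the intended one. — e.g. on scores_increasing([]): A returns false, B returns true
import Mathlib
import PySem

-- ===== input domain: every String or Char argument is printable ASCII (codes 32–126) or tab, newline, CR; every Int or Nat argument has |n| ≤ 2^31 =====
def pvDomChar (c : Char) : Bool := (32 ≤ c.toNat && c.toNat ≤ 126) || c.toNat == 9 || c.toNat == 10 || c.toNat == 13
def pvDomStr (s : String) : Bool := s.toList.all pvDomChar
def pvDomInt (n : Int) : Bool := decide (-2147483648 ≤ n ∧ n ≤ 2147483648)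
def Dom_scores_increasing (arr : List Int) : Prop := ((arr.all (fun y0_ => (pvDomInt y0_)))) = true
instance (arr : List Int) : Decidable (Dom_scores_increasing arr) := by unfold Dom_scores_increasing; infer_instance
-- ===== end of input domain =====

-- B replaces A's pairwise-comparison counter loop with a sort-then-compare (arr == sorted(arr)); simpler, and intentionally True on [].

-- ===== PORT A =====
-- counter loop over range(len(arr)-1); indices i and i+1 are always in range, so pyGetD's default is never used
def scores_increasing (arr : List Int) : Bool :=
  let counter : Int :=
    (PySem.List.pyRange 0 ((arr.length : Int) - 1) 1).foldl
      (fun c i => if PySem.List.pyGetD arr (i + 1) 0 ≥ PySem.List.pyGetD arr i 0 then c + 1 else c) 0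
  if counter = (arr.length : Int) - 1 then true else false

-- ===== PORT B =====
def scores_increasing_alt (arr : List Int) : Bool :=
  decide (arr = PySem.List.sorted arr (fun x => x) false)

-- ===== PRECONDITION & SPEC =====
-- On the empty list A returns False (counter==len-1 compares 0 with -1), B returns True; the empty sequence is vacuously non-decreasing, so B's value is intended.
def D_scores_increasing (arr : List Int) : Prop := arr = []
instance (arr : List Int) : Decidable (D_scores_increasing arr) := by unfold D_scores_increasing; infer_instance
def Spec_scores_increasing (arr : List Int) (out : Bool) : Prop := ¬ D_scores_increasing arr → out = scores_increasing_alt arr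
instance (arr : List Int) (out : Bool) : Decidable (Spec_scores_increasing arr out) := by unfold Spec_scores_increasing; infer_instance
def pvDiffWitness_scores_increasing : List Int := []
def pvDiffWitnessOut_scores_increasing : Bool × Bool := (false, true)

-- ===== CLAIM =====
def Claim_unchanged_scores_increasing : Prop := ∀ (arr : List Int), Dom_scores_increasing arr → Spec_scores_increasing arr (scores_increasing arr)
def Claim_changed_scores_increasing : Prop := Dom_scores_increasing (pvDiffWitness_scores_increasing) ∧ D_scores_increasing (pvDiffWitness_scores_increasing) ∧ scores_increasing (pvDiffWitness_scores_increasing) = pvDiffWitnessOut_scores_increasing.1 ∧ scores_increasing_alt (pvDiffWitness_scores_increasing) = pvDiffWitnessOut_scores_increasing.2 ∧ pvDiffWitnessOut_scores_increasing.1 ≠ pvDiffWitnessOut_scores_increasing.2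
def Claim_exact_scores_increasing : Prop := ∀ (arr : List Int), Dom_scores_increasing arr → D_scores_increasing arr → scores_increasing arr ≠ scores_increasing_alt arr

-- ===== LEMMAS AND PROOFS =====

-- the counter loop counts the indices whose adjacent pair is in order
theorem foldl_count_if {α : Type} (p : α → Prop) [DecidablePred p] :
    ∀ (l : List α) (c : Int),
      l.foldl (fun c i => if p i then c + 1 else c) c = c + (l.countP (fun i => decide (p i)) : Int) := by
  intro l
  induction l with
  | nil => intro c; simp
  | cons x t ih =>
    intro c
    by_cases h : p x <;> simp [h, ih]; ring

-- B's test is the Pairwise predicate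
theorem alt_eq_pairwise (arr : List Int) :
    scores_increasing_alt arr = decide (arr.Pairwise (· ≤ ·)) := by
  unfold scores_increasing_alt
  by_cases h : arr.Pairwise (· ≤ ·)
  · simp [h, (PySem.List.sorted_id_eq_of_perm_of_pairwise arr arr (List.Perm.refl arr) h)]
  · simp [h]
    intro he
    exact h (by simpa using he ▸ PySem.List.sorted_pairwise arr (fun x => x))

theorem scores_increasing_spec : Claim_unchanged_scores_increasing := by
  intro arr _ hD
  rw [alt_eq_pairwise]
  unfold scores_increasing
  obtain ⟨n, hn⟩ : ∃ n : Nat, arr.length = n + 1 := by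
    cases arr with
    | nil => exact absurd rfl hD
    | cons a t => exact ⟨t.length, rfl⟩
  have hrange : PySem.List.pyRange 0 ((arr.length : Int) - 1) 1
      = (List.range n).map (fun (k : Nat) => ((k : Int) : Int)) := by
    rw [PySem.List.pyRange_one]
    have h1 : (((arr.length : Int) - 1) - 0).toNat = n := by omega
    rw [h1]
    exact List.map_congr_left (fun k _ => by omega)
  rw [hrange, foldl_count_if (fun i : Int => PySem.List.pyGetD arr (i + 1) 0 ≥ PySem.List.pyGetD arr i 0), List.countP_map]
  have hQiff : ∀ k, (hk : k < n) → ((((fun i : Int => decide (PySem.List.pyGetD arr (i + 1) 0 ≥ PySem.List.pyGetD arr i 0)) ∘ (fun (k : Nat) => ((k : Int) : Int))) k = true) ↔ arr[k]'(by omega) ≤ arr[k+1]'(by omega)) := by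
    intro k hk
    simp only [Function.comp, decide_eq_true_eq]
    have h1 : PySem.List.pyGetD arr (k : Int) 0 = arr[k]'(by omega) := by
      rw [PySem.List.pyGetD_natCast]
      exact List.getD_eq_getElem arr 0 (by omega)
    have h2 : PySem.List.pyGetD arr ((k : Int) + 1) 0 = arr[k+1]'(by omega) := by
      have he : ((k : Int) + 1) = ((k + 1 : Nat) : Int) := by push_cast; ring
      rw [he, PySem.List.pyGetD_natCast]
      exact List.getD_eq_getElem arr 0 (by omega)
    rw [h1, h2]
  have hchain : arr.Pairwise (· ≤ ·) ↔ ∀ k, k < n →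
      (((fun i : Int => decide (PySem.List.pyGetD arr (i + 1) 0 ≥ PySem.List.pyGetD arr i 0)) ∘ (fun (k : Nat) => ((k : Int) : Int))) k = true) := by
    rw [← List.isChain_iff_pairwise, List.isChain_iff_getElem]
    constructor
    · intro h k hk
      exact (hQiff k hk).mpr (h k (by omega))
    · intro h i hi
      exact (hQiff i (by omega)).mp (h i (by omega))
  by_cases hp : arr.Pairwise (· ≤ ·)
  · have hall : ∀ a ∈ List.range n,
        (((fun i : Int => decide (PySem.List.pyGetD arr (i + 1) 0 ≥ PySem.List.pyGetD arr i 0)) ∘ (fun (k : Nat) => ((k : Int) : Int))) a = true) := by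
      intro a ha
      exact hchain.mp hp a (List.mem_range.mp ha)
    rw [List.countP_eq_length.mpr hall]
    simp [hn, hp]
  · have hle := List.countP_le_length (l := List.range n)
      (p := ((fun i : Int => decide (PySem.List.pyGetD arr (i + 1) 0 ≥ PySem.List.pyGetD arr i 0)) ∘ (fun (k : Nat) => ((k : Int) : Int))))
    simp only [List.length_range] at hle
    have hne : (List.range n).countP ((fun i : Int => decide (PySem.List.pyGetD arr (i + 1) 0 ≥ PySem.List.pyGetD arr i 0)) ∘ (fun (k : Nat) => ((k : Int) : Int))) ≠ n := by
      intro heq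
      have hlen : (List.range n).length = n := List.length_range
      have hall := List.countP_eq_length.mp (heq.trans hlen.symm)
      exact hp (hchain.mpr (fun k hk => hall k (List.mem_range.mpr hk)))
    have hcnt : ¬ ((0 : Int) + ((List.range n).countP ((fun i : Int => decide (PySem.List.pyGetD arr (i + 1) 0 ≥ PySem.List.pyGetD arr i 0)) ∘ (fun (k : Nat) => ((k : Int) : Int))) : Int) = (arr.length : Int) - 1) := by
      rw [hn]; push_cast; omega
    simp only [hcnt, if_false]
    simp [hp]

-- ===== VERDICT =====
theorem scores_increasing_changed : Claim_changed_scores_increasing := by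
  unfold Claim_changed_scores_increasing; decide

theorem scores_increasing_tight : Claim_exact_scores_increasing := by
  intro arr _ hD
  subst hD
  decide
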